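-- pv_equiv track=rewrite | github.com/IngRobertFodor/Basic-Python-Programs | buy_nine_get_one_free.py | buy_nine_get_one_free
-- ===== SOURCE A (Python) =====
-- def buy_nine_get_one_free(my_quantity, my_product_price):
--     my_price_to_pay = 0
--     for my_q in range(1,my_quantity+1):
--         if my_q % 10 == 0:
--             my_price_to_pay = my_price_to_pay
--         else:
--             my_price_to_pay += my_product_price
--     return my_price_to_pay
-- ===== SOURCE B (Python) =====
-- def buy_nine_get_one_free(my_quantity, my_product_price):
--     n = max(my_quantity, 0)
--     return (n - n // 10) * my_product_price
-- ===== Notes on version B (the rewrite author's own statement) =====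
-- stated objective: faster
-- what changed: Replaces the per-item loop with the closed form (n - n//10) * price where n = max(quantity, 0).
import Mathlib
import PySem

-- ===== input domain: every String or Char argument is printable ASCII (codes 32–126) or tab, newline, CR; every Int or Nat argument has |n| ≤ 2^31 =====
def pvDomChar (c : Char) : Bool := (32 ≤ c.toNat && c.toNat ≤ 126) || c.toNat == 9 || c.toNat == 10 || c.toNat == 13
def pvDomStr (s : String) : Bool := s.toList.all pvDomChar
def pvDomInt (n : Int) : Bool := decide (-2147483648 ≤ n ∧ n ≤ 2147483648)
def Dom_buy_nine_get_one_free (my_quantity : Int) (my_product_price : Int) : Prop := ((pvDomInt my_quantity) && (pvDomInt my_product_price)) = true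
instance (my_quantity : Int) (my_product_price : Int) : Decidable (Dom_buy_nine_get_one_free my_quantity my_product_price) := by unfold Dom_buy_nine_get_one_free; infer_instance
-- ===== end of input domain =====

-- B replaces A's per-item accumulation loop by the closed form (n - n//10) * price, n = max(quantity, 0): O(1) instead of O(n).

-- ===== PORT A =====
def buy_nine_get_one_free (my_quantity : Int) (my_product_price : Int) : Int :=
  (PySem.List.pyRange 1 (my_quantity + 1) 1).foldl
    (fun my_price_to_pay my_q =>
      if PySem.Int.mod my_q 10 == 0 then my_price_to_pay
      else my_price_to_pay + my_product_price) 0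

-- ===== PORT B =====
def buy_nine_get_one_free_alt (my_quantity : Int) (my_product_price : Int) : Int :=
  let n := max my_quantity 0
  (n - PySem.Int.floordiv n 10) * my_product_price

-- ===== PRECONDITION & SPEC =====
def Spec_buy_nine_get_one_free (my_quantity : Int) (my_product_price : Int) (out : Int) : Prop := out = buy_nine_get_one_free_alt my_quantity my_product_price
instance (my_quantity : Int) (my_product_price : Int) (out : Int) : Decidable (Spec_buy_nine_get_one_free my_quantity my_product_price out) := by unfold Spec_buy_nine_get_one_free; infer_instance

-- ===== CLAIM (what is proved, stated in full; the proofs are below) =====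
def Claim_equal_buy_nine_get_one_free : Prop := ∀ (my_quantity : Int) (my_product_price : Int), Dom_buy_nine_get_one_free my_quantity my_product_price → Spec_buy_nine_get_one_free my_quantity my_product_price (buy_nine_get_one_free my_quantity my_product_price)

-- ===== LEMMAS AND PROOFS =====

-- A's loop over range(1, n+1) computes the closed form, by induction on n.
theorem loop_closed_form (p : Int) (n : Nat) :
    (PySem.List.pyRange 1 ((n : Int) + 1) 1).foldl
      (fun acc q => if PySem.Int.mod q 10 == 0 then acc else acc + p) 0
    = ((n : Int) - (n : Int) / 10) * p := by
  induction n with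
  | zero => simp [PySem.List.pyRange_one_eq_nil]
  | succ m ih =>
    rw [show ((m + 1 : Nat) : Int) + 1 = ((m : Int) + 1) + 1 by push_cast; ring,
        PySem.List.pyRange_one_succ_right (by omega)]
    · rw [List.foldl_append, ih]
      simp only [List.foldl_cons, List.foldl_nil,
        PySem.Int.mod_eq_emod_of_pos (by norm_num : (0:Int) < 10)]
      push_cast
      by_cases h : ((m : Int) + 1) % 10 = 0
      · have hc : ((m : Int) + 1) - ((m : Int) + 1) / 10 = (m : Int) - (m : Int) / 10 := by
          omega
        simp [h, hc]
      · have hc : ((m : Int) + 1) - ((m : Int) + 1) / 10 = ((m : Int) - (m : Int) / 10) + 1 := by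
          omega
        rw [if_neg (by simpa using h)]
        rw [hc]; ring

theorem buy_nine_get_one_free_eq (q p : Int) :
    buy_nine_get_one_free q p = buy_nine_get_one_free_alt q p := by
  unfold buy_nine_get_one_free buy_nine_get_one_free_alt
  by_cases hq : q ≤ 0
  · rw [PySem.List.pyRange_one_eq_nil (by omega)]
    rw [show max q 0 = 0 by omega]
    simp [PySem.Int.floordiv]
  · have hn : q = (q.toNat : Int) := by omega
    rw [show max q 0 = q by omega, hn, loop_closed_form]
    simp only [PySem.Int.floordiv_eq_ediv_of_pos (by norm_num : (0:Int) < 10)]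

-- ===== VERDICT (by name: the statement is the Claim_ definition above) =====
theorem buy_nine_get_one_free_spec : Claim_equal_buy_nine_get_one_free := by
  intro q p _
  exact buy_nine_get_one_free_eq q p
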